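-- pv_equiv track=rewrite | github.com/julianazapata12/La-carpeta | LA CARPETA/uco_was_interpreter.py | get_token_positions
-- ===== SOURCE A (Python) =====
-- def get_token_positions(input_str):
--     positions = []
--     row, col = 1, 1
--     for i, char in enumerate(input_str):
--         if char == '\n':
--             row += 1
--             col = 1
--         else:
--             col += 1
--         positions.append((row, col))
--     return positions
-- ===== SOURCE B (Python) =====
-- def get_token_positions(input_str):
--     lines = input_str.split('\n')
--     n = len(lines)
--     positions = []
--     for r, line in enumerate(lines, 1):
--         for j in range(len(line)):
--             positions.append((r, j + 2))
--         if r < n: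
--             positions.append((r + 1, 1))
--     return positions
-- ===== Notes on version B (the rewrite author's own statement) =====
-- stated objective: alternative
-- what changed: B splits the input on '\n' once and emits each line's positions by index (column j+2) plus one (row+1,1) entry per newline, instead of A's single character-by-character pass threading a (row,col) state machine.
import Mathlib
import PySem

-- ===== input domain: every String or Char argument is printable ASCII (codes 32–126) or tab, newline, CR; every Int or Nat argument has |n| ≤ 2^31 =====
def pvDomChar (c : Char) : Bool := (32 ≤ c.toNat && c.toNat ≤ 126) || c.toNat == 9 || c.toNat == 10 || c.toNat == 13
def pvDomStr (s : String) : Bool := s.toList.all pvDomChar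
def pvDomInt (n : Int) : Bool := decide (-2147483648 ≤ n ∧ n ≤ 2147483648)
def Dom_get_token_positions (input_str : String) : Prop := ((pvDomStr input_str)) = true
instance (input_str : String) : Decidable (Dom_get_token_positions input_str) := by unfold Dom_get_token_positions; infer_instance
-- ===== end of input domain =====

-- B splits the input on '\n' and emits per-line positions directly, instead of A's char-by-char (row,col) state machine; alternative decomposition, same cost.


-- ===== PORT A =====
def get_token_positions (input_str : String) : List (Int × Int) :=
  (input_str.toList.foldl
    (fun (st : List (Int × Int) × Int × Int) char =>
      let positions := st.1
      let row := st.2.1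
      let col := st.2.2
      if char = '\n' then (positions ++ [(row + 1, (1 : Int))], row + 1, (1 : Int))
      else (positions ++ [(row, col + 1)], row, col + 1))
    ([], 1, 1)).1

-- ===== PORT B =====
def get_token_positions_alt (input_str : String) : List (Int × Int) :=
  let lines := PySem.Chars.splitOn input_str.toList ['\n']
  let n : Int := (lines.length : Int)
  (PySem.List.enumerate lines 1).foldl
    (fun (positions : List (Int × Int)) rl =>
      let r := rl.1
      let line := rl.2
      let positions :=
        (PySem.List.pyRange 0 (line.length : Int) 1).foldl
          (fun p j => p ++ [(r, j + 2)]) positions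
      if r < n then positions ++ [(r + 1, 1)] else positions)
    []

-- ===== PRECONDITION & SPEC =====
def Spec_get_token_positions (input_str : String) (out : List (Int × Int)) : Prop := out = get_token_positions_alt input_str
instance (input_str : String) (out : List (Int × Int)) : Decidable (Spec_get_token_positions input_str out) := by unfold Spec_get_token_positions; infer_instance

-- ===== CLAIM (what is proved, stated in full; the proofs are below) =====
def Claim_equal_get_token_positions : Prop := ∀ (input_str : String), Dom_get_token_positions input_str → Spec_get_token_positions input_str (get_token_positions input_str)

-- ===== LEMMAS AND PROOFS =====

-- structural line split: the lines of a char list, separator '\n'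
def linesOf : List Char → List (List Char)
  | [] => [[]]
  | c :: rest =>
    if c = '\n' then [] :: linesOf rest
    else
      match linesOf rest with
      | [] => [[c]]
      | h :: t => (c :: h) :: t

lemma linesOf_ne_nil (l : List Char) : linesOf l ≠ [] := by
  cases l with
  | nil => simp [linesOf]
  | cons c rest =>
    simp only [linesOf]
    split_ifs
    · simp
    · cases h : linesOf rest <;> simp

-- positions of one line: columns col+1, col+2, …
def part (r col : Int) (line : List Char) : List (Int × Int) :=
  (List.range line.length).map (fun j : Nat => (r, col + (j : Int) + 1))

-- positions of a list of lines starting at row r, current column col (a (r+1,1) entry for each newline)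
def blk (r col : Int) : List (List Char) → List (Int × Int)
  | [] => []
  | [x] => part r col x
  | x :: y :: t => part r col x ++ (r + 1, 1) :: blk (r + 1) 1 (y :: t)

lemma part_cons (r col : Int) (c : Char) (h : List Char) :
    part r col (c :: h) = (r, col + 1) :: part r (col + 1) h := by
  unfold part
  rw [List.length_cons, List.range_succ_eq_map, List.map_cons, List.map_map]
  congr 1
  · norm_num
  · refine List.map_congr_left (fun j _ => ?_)
    simp only [Function.comp_apply, Prod.mk.injEq, true_and]
    push_cast
    ring

lemma blk_cons_cons (r col : Int) (c : Char) (h : List Char) (t : List (List Char)) :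
    blk r col ((c :: h) :: t) = (r, col + 1) :: blk r (col + 1) (h :: t) := by
  cases t with
  | nil => simp [blk, part_cons]
  | cons y ys => simp [blk, part_cons]

-- A's fold computes blk over linesOf
lemma A_run (l : List Char) : ∀ (row col : Int) (acc : List (Int × Int)),
    (l.foldl
      (fun (st : List (Int × Int) × Int × Int) char =>
        if char = '\n' then (st.1 ++ [(st.2.1 + 1, (1 : Int))], st.2.1 + 1, (1 : Int))
        else (st.1 ++ [(st.2.1, st.2.2 + 1)], st.2.1, st.2.2 + 1))
      (acc, row, col)).1 = acc ++ blk row col (linesOf l) := by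
  induction l with
  | nil => intro row col acc; simp [linesOf, blk, part]
  | cons c rest ih =>
    intro row col acc
    by_cases hc : c = '\n'
    · subst hc
      simp only [List.foldl_cons, if_pos]
      rw [ih]
      have hne := linesOf_ne_nil rest
      cases hl : linesOf rest with
      | nil => exact absurd hl hne
      | cons h t =>
        simp [linesOf, hl, blk, part]
    · simp only [List.foldl_cons, if_neg hc]
      rw [ih]
      have hne := linesOf_ne_nil rest
      cases hl : linesOf rest with
      | nil => exact absurd hl hne
      | cons h t =>
        simp only [linesOf, if_neg hc, hl]
        rw [blk_cons_cons]
        simp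

-- inner loop of B: appending (r, j+2) for j in range(len(line)) is part r 1
lemma B_inner (r : Int) (line : List Char) (pos : List (Int × Int)) :
    (PySem.List.pyRange 0 (line.length : Int) 1).foldl
      (fun p j => p ++ [(r, j + 2)]) pos = pos ++ part r 1 line := by
  rw [PySem.List.pyRange_zero_nat, PySem.List.foldl_append_singleton_eq_map, List.map_map]
  unfold part
  congr 1
  refine List.map_congr_left (fun j _ => ?_)
  simp only [Function.comp_apply, Prod.mk.injEq, true_and]
  ring

-- outer loop of B over a suffix of the lines, 1-based index r, total count n
lemma B_run (n : Int) : ∀ (ls : List (List Char)) (r : Int) (pos : List (Int × Int)),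
    ls ≠ [] → r + ls.length = n + 1 →
    (PySem.List.enumerate ls r).foldl
      (fun (positions : List (Int × Int)) rl =>
        if rl.1 < n then
          ((PySem.List.pyRange 0 (rl.2.length : Int) 1).foldl
            (fun p j => p ++ [(rl.1, j + 2)]) positions) ++ [(rl.1 + 1, 1)]
        else
          (PySem.List.pyRange 0 (rl.2.length : Int) 1).foldl
            (fun p j => p ++ [(rl.1, j + 2)]) positions)
      pos = pos ++ blk r 1 ls := by
  intro ls
  induction ls with
  | nil => intro r pos h; exact absurd rfl h
  | cons x t ih =>
    intro r pos _ hlen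
    rw [PySem.List.enumerate_cons]
    simp only [List.foldl_cons]
    cases t with
    | nil =>
      have hr : ¬ r < n := by simp at hlen; omega
      simp only [PySem.List.enumerate_nil, List.foldl_nil, if_neg hr, B_inner]
      simp [blk]
    | cons y ys =>
      have hr : r < n := by simp at hlen; omega
      rw [ih (r + 1) _ (by simp) (by simp at hlen ⊢; omega), if_pos hr, B_inner]
      simp [blk]

-- consHead p prepends p to the first line
def consHead (p : List Char) : List (List Char) → List (List Char)
  | [] => [p]
  | h :: t => (p ++ h) :: t

-- splitOn's fuelled worker, specialised to separator ['\n'], computes linesOf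
lemma splitOn_go_spec (fuel : Nat) : ∀ (l cur : List Char) (acc : List (List Char)),
    l.length < fuel →
    PySem.Chars.splitOn.go ['\n'] fuel l cur acc
      = acc.reverse ++ consHead cur.reverse (linesOf l) := by
  induction fuel with
  | zero => intro l cur acc h; omega
  | succ f ih =>
    intro l cur acc h
    cases l with
    | nil =>
      simp [PySem.Chars.splitOn.go, linesOf, consHead]
    | cons c rest =>
      by_cases hc : c = '\n'
      · subst hc
        rw [show PySem.Chars.splitOn.go ['\n'] (f+1) ('\n' :: rest) cur acc
              = PySem.Chars.splitOn.go ['\n'] f rest [] (cur.reverse :: acc) by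
            simp [PySem.Chars.splitOn.go, List.isPrefixOf]]
        rw [ih rest [] _ (by simp at h; omega)]
        have hne := linesOf_ne_nil rest
        cases hl : linesOf rest with
        | nil => exact absurd hl hne
        | cons hd tl => simp [linesOf, hl, consHead]
      · have hc' : ¬ ('\n' = c) := fun e => hc e.symm
        rw [show PySem.Chars.splitOn.go ['\n'] (f+1) (c :: rest) cur acc
              = PySem.Chars.splitOn.go ['\n'] f rest (c :: cur) acc by
            simp [PySem.Chars.splitOn.go, List.isPrefixOf, hc']]
        rw [ih rest (c :: cur) acc (by simp at h; omega)]
        have hne := linesOf_ne_nil rest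
        cases hl : linesOf rest with
        | nil => exact absurd hl hne
        | cons hd tl => simp [linesOf, hc, hl, consHead]

lemma splitOn_eq_linesOf (l : List Char) :
    PySem.Chars.splitOn l ['\n'] = linesOf l := by
  unfold PySem.Chars.splitOn
  rw [splitOn_go_spec (l.length + 1) l [] [] (by omega)]
  have hne := linesOf_ne_nil l
  cases hl : linesOf l with
  | nil => exact absurd hl hne
  | cons hd tl => simp [consHead]

-- ===== VERDICT (by name: the statement is the Claim_ definition above) =====
theorem get_token_positions_spec : Claim_equal_get_token_positions := by
  intro s _
  unfold Spec_get_token_positions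
  show (s.toList.foldl
      (fun (st : List (Int × Int) × Int × Int) char =>
        if char = '\n' then (st.1 ++ [(st.2.1 + 1, (1 : Int))], st.2.1 + 1, (1 : Int))
        else (st.1 ++ [(st.2.1, st.2.2 + 1)], st.2.1, st.2.2 + 1))
      ([], 1, 1)).1
    = (PySem.List.enumerate (PySem.Chars.splitOn s.toList ['\n']) 1).foldl
      (fun (positions : List (Int × Int)) rl =>
        if rl.1 < ((PySem.Chars.splitOn s.toList ['\n']).length : Int) then
          ((PySem.List.pyRange 0 (rl.2.length : Int) 1).foldl
            (fun p j => p ++ [(rl.1, j + 2)]) positions) ++ [(rl.1 + 1, 1)]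
        else
          (PySem.List.pyRange 0 (rl.2.length : Int) 1).foldl
            (fun p j => p ++ [(rl.1, j + 2)]) positions)
      []
  rw [A_run, splitOn_eq_linesOf,
    B_run ((linesOf s.toList).length : Int) (linesOf s.toList) 1 [] (linesOf_ne_nil _)
      (by omega)]
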